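-- pv_equiv track=rewrite | github.com/MohamedAtta-AI/CSP-Crosswords | CSP.py | constraint_satisfied
-- ===== SOURCE A (Python) =====
-- def constraint_satisfied(insertion_type, used_locs, insertion_loc, w_length):
--     # Overlapping words test function
--     for i in range(w_length):
--         if insertion_type == 0:
--             if (insertion_loc[0], insertion_loc[1] + i) in used_locs:
--                 return False
--
--         elif insertion_type == 1:
--             if (insertion_loc[0] + i, insertion_loc[1]) in used_locs:
--                 return False
--
--         elif insertion_type == 2:
--             if (insertion_loc[0] - i, insertion_loc[1] + i) in used_locs:
--                 return False
--
--         elif insertion_type == 3: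
--             if (insertion_loc[0] + i, insertion_loc[1] + i) in used_locs:
--                 return False
--
--     return True
-- ===== SOURCE B (Python) =====
-- def constraint_satisfied(insertion_type, used_locs, insertion_loc, w_length):
--     # Single pass over used_locs: a used cell blocks the word iff it lies on
--     # the word's segment, decided by closed-form offset arithmetic (no scan
--     # over the word's cells).
--     r0, c0 = insertion_loc
--
--     def on_segment(cell):
--         a = cell[0] - r0
--         b = cell[1] - c0
--         if insertion_type == 0:
--             return a == 0 and 0 <= b < w_length
--         if insertion_type == 1:
--             return b == 0 and 0 <= a < w_length
--         if insertion_type == 2: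
--             return a + b == 0 and 0 <= b < w_length
--         if insertion_type == 3:
--             return a == b and 0 <= a < w_length
--         return False
--
--     return not any(map(on_segment, used_locs))
-- ===== Notes on version B (the rewrite author's own statement) =====
-- stated objective: faster
-- what changed: Inverts the loops: instead of scanning the w_length cells of the word and testing each for membership in used_locs, B makes one pass over used_locs and decides for each used cell by closed-form offset arithmetic whether it lies on the word's segment, so the w_length loop disappears.
import Mathlib
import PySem

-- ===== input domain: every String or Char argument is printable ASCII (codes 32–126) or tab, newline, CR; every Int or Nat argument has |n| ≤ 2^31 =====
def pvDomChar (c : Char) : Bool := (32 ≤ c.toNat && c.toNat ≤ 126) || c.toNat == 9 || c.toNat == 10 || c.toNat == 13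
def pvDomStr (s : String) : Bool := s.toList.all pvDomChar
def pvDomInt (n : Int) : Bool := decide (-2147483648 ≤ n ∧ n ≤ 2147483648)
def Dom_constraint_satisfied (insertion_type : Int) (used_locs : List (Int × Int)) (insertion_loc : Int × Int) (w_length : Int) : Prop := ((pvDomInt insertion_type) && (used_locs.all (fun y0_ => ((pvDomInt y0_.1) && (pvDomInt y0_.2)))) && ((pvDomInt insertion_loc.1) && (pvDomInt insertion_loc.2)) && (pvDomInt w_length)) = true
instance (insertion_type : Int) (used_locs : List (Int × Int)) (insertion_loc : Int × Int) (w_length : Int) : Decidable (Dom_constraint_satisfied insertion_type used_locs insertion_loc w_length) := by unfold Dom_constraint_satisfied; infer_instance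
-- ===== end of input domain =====

-- B inverts the loops: one pass over used_locs with a closed-form on-segment test, so the
-- w_length scan disappears (faster: O(|used_locs|) vs A's O(w_length*|used_locs|)).

-- ===== PORT A =====
-- A: for i in range(w_length): branch on insertion_type, early-return False on a hit; True after the loop.
def csLoopA (t : Int) (u : List (Int × Int)) (loc : Int × Int) : List Int → Bool
  | [] => true
  | i :: rest =>
    if t == 0 then
      if u.contains (loc.1, loc.2 + i) then false else csLoopA t u loc rest
    else if t == 1 then
      if u.contains (loc.1 + i, loc.2) then false else csLoopA t u loc rest
    else if t == 2 then
      if u.contains (loc.1 - i, loc.2 + i) then false else csLoopA t u loc rest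
    else if t == 3 then
      if u.contains (loc.1 + i, loc.2 + i) then false else csLoopA t u loc rest
    else csLoopA t u loc rest

def constraint_satisfied (insertion_type : Int) (used_locs : List (Int × Int)) (insertion_loc : Int × Int) (w_length : Int) : Bool :=
  csLoopA insertion_type used_locs insertion_loc (PySem.List.pyRange 0 w_length 1)

-- ===== PORT B =====
-- B's helper on_segment: does a used cell lie on the word's segment (closed-form offsets)?
def csOnSeg (t : Int) (loc : Int × Int) (w : Int) (cell : Int × Int) : Bool :=
  let a := cell.1 - loc.1
  let b := cell.2 - loc.2
  if t == 0 then a == 0 && decide (0 ≤ b) && decide (b < w)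
  else if t == 1 then b == 0 && decide (0 ≤ a) && decide (a < w)
  else if t == 2 then a + b == 0 && decide (0 ≤ b) && decide (b < w)
  else if t == 3 then a == b && decide (0 ≤ a) && decide (a < w)
  else false

def constraint_satisfied_alt (insertion_type : Int) (used_locs : List (Int × Int)) (insertion_loc : Int × Int) (w_length : Int) : Bool :=
  !(used_locs.any (csOnSeg insertion_type insertion_loc w_length))

-- ===== PRECONDITION & SPEC =====
def Spec_constraint_satisfied (insertion_type : Int) (used_locs : List (Int × Int)) (insertion_loc : Int × Int) (w_length : Int) (out : Bool) : Prop := out = constraint_satisfied_alt insertion_type used_locs insertion_loc w_length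
instance (insertion_type : Int) (used_locs : List (Int × Int)) (insertion_loc : Int × Int) (w_length : Int) (out : Bool) : Decidable (Spec_constraint_satisfied insertion_type used_locs insertion_loc w_length out) := by unfold Spec_constraint_satisfied; infer_instance

-- ===== CLAIM (what is proved, stated in full; the proofs are below) =====
def Claim_equal_constraint_satisfied : Prop := ∀ (insertion_type : Int) (used_locs : List (Int × Int)) (insertion_loc : Int × Int) (w_length : Int), Dom_constraint_satisfied insertion_type used_locs insertion_loc w_length → Spec_constraint_satisfied insertion_type used_locs insertion_loc w_length (constraint_satisfied insertion_type used_locs insertion_loc w_length)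

-- ===== LEMMAS AND PROOFS =====

-- A's loop body, for a fixed recognised t, is an `all` over its index list.
theorem csLoopA_eq_all (t : Int) (u : List (Int × Int)) (loc : Int × Int)
    (f : Int → Int × Int)
    (hf : ∀ i rest, csLoopA t u loc (i :: rest) =
      (if u.contains (f i) then false else csLoopA t u loc rest)) (L : List Int) :
    csLoopA t u loc L = L.all (fun i => !u.contains (f i)) := by
  induction L with
  | nil => rfl
  | cons i rest ih =>
    rw [hf i rest, List.all_cons, ih]
    by_cases h : u.contains (f i) <;> simp [h]

-- Bridge: an all-scan over the segment's cells equals the negated any-scan over used_locs,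
-- given the closed-form characterisation of "on segment".
theorem all_range_eq_not_any (u : List (Int × Int)) (w : Int) (f : Int → Int × Int)
    (g : Int × Int → Bool)
    (hchar : ∀ p, g p = true ↔ ∃ i, 0 ≤ i ∧ i < w ∧ p = f i) :
    ((PySem.List.pyRange 0 w 1).all fun i => !u.contains (f i)) = !(u.any g) := by
  rcases Bool.eq_false_or_eq_true (u.any g) with hb | hb
  · rw [hb]
    rw [List.any_eq_true] at hb
    obtain ⟨p, hp, hg⟩ := hb
    obtain ⟨i, h0, hw, rfl⟩ := (hchar p).mp hg
    simp only [Bool.not_true, List.all_eq_false]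
    exact ⟨i, by rw [PySem.List.mem_pyRange_one]; exact ⟨h0, hw⟩, by simpa using hp⟩
  · rw [hb]
    rw [List.any_eq_false] at hb
    simp only [Bool.not_false, List.all_eq_true, Bool.not_eq_true', PySem.List.mem_pyRange_one]
    intro i hi
    rcases Bool.eq_false_or_eq_true (u.contains (f i)) with hc | hc
    · exfalso
      have hm : f i ∈ u := by simpa using hc
      exact hb _ hm (by rw [hchar]; exact ⟨i, hi.1, hi.2, rfl⟩)
    · exact hc

-- For unrecognised insertion types A's loop never hits, and B's predicate is constantly false.
theorem csLoopA_other (t : Int) (u : List (Int × Int)) (loc : Int × Int)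
    (h0 : (t == 0) = false) (h1 : (t == 1) = false) (h2 : (t == 2) = false)
    (h3 : (t == 3) = false) (L : List Int) : csLoopA t u loc L = true := by
  induction L with
  | nil => rfl
  | cons i rest ih => simp [csLoopA, h0, h1, h2, h3, ih]

-- ===== VERDICT (by name: the statement is the Claim_ definition above) =====
theorem constraint_satisfied_spec : Claim_equal_constraint_satisfied := by
  intro t u loc w _
  unfold Spec_constraint_satisfied constraint_satisfied constraint_satisfied_alt
  by_cases ht0 : t = 0
  · subst ht0
    rw [csLoopA_eq_all 0 u loc (fun i => (loc.1, loc.2 + i)) (fun i rest => by simp [csLoopA])]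
    exact all_range_eq_not_any u w _ _ (fun p => by
      simp only [csOnSeg]
      constructor
      · intro h; simp at h; exact ⟨p.2 - loc.2, by omega, by omega, by
          obtain ⟨p1, p2⟩ := p; simp at h ⊢; omega⟩
      · rintro ⟨i, hi0, hiw, rfl⟩; simp; omega)
  by_cases ht1 : t = 1
  · subst ht1
    rw [csLoopA_eq_all 1 u loc (fun i => (loc.1 + i, loc.2)) (fun i rest => by simp [csLoopA])]
    exact all_range_eq_not_any u w _ _ (fun p => by
      simp only [csOnSeg]
      constructor
      · intro h; simp at h; exact ⟨p.1 - loc.1, by omega, by omega, by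
          obtain ⟨p1, p2⟩ := p; simp at h ⊢; omega⟩
      · rintro ⟨i, hi0, hiw, rfl⟩; simp; omega)
  by_cases ht2 : t = 2
  · subst ht2
    rw [csLoopA_eq_all 2 u loc (fun i => (loc.1 - i, loc.2 + i)) (fun i rest => by simp [csLoopA])]
    exact all_range_eq_not_any u w _ _ (fun p => by
      simp only [csOnSeg]
      constructor
      · intro h; simp at h; exact ⟨p.2 - loc.2, by omega, by omega, by
          obtain ⟨p1, p2⟩ := p; simp at h ⊢; omega⟩
      · rintro ⟨i, hi0, hiw, rfl⟩; simp; omega)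
  by_cases ht3 : t = 3
  · subst ht3
    rw [csLoopA_eq_all 3 u loc (fun i => (loc.1 + i, loc.2 + i)) (fun i rest => by simp [csLoopA])]
    exact all_range_eq_not_any u w _ _ (fun p => by
      simp only [csOnSeg]
      constructor
      · intro h; simp at h; exact ⟨p.1 - loc.1, by omega, by omega, by
          obtain ⟨p1, p2⟩ := p; simp at h ⊢; omega⟩
      · rintro ⟨i, hi0, hiw, rfl⟩; simp; omega)
  · rw [csLoopA_other t u loc (by simp [ht0]) (by simp [ht1]) (by simp [ht2]) (by simp [ht3])]
    have hg : u.any (csOnSeg t loc w) = false := by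
      rw [List.any_eq_false]
      intro p _; simp [csOnSeg, ht0, ht1, ht2, ht3]
    rw [hg]
    rfl
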